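-- pv_equiv track=rewrite | github.com/sffranke/universalclock | main.py | create_text_matrix
-- ===== SOURCE A (Python) =====
-- def create_text_matrix(text, font_dict, spacing=1, value=1):
--     matrix = [[] for _ in range(5)]
--     for i, ch in enumerate(text):
--         char_matrix = font_dict.get(ch, font_dict[" "])
--         for row in range(5):
--             for pixel in char_matrix[row]:
--                 matrix[row].append(value if pixel == 1 else 0)
--         if i != len(text) - 1:
--             for row in range(5):
--                 matrix[row].extend([0] * spacing)
--     return matrix
-- ===== SOURCE B (Python) =====
-- def create_text_matrix(text, font_dict, spacing=1, value=1):
--     glyphs = [font_dict.get(ch, font_dict[" "]) for ch in text]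
--     sep = [0] * spacing
--     matrix = []
--     for row in range(5):
--         segments = [[value if p == 1 else 0 for p in g[row]] for g in glyphs]
--         line = segments[0] if segments else []
--         for seg in segments[1:]:
--             line = line + sep + seg
--         matrix.append(line)
--     return matrix
-- ===== Notes on version B (the rewrite author's own statement) =====
-- stated objective: alternative
-- what changed: B first materialises the glyph list, then builds the matrix row-outer/character-inner, joining per-character segments with a [0]*spacing separator instead of A's char-outer loop with an explicit not-last-character spacer branch.
import Mathlib
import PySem

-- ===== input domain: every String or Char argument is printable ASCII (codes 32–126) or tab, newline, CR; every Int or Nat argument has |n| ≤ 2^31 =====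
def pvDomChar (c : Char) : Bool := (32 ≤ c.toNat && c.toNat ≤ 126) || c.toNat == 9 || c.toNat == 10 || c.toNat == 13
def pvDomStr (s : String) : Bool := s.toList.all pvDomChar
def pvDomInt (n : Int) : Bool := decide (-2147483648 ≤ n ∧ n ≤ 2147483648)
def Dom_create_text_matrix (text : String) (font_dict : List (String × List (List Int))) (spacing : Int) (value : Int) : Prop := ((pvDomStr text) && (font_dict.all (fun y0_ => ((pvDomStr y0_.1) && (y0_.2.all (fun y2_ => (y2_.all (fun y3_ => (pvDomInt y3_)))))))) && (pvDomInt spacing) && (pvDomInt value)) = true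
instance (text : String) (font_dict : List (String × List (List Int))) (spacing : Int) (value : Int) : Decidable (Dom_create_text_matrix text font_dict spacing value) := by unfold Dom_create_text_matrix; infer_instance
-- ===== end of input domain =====

-- B rebuilds the matrix row-by-row from a precomputed glyph list, joining translated
-- segments with a spacer separator (objective: alternative decomposition, same cost).


-- ===== PORT A =====
-- font_dict.get(ch, font_dict[" "]) (the eager default raising when " " is missing is excluded by Pre_)
def pvGlyphA (font_dict : List (String × List (List Int))) (ch : Char) : List (List Int) :=
  match List.lookup (String.ofList [ch]) font_dict with
  | some g => g
  | none => (List.lookup " " font_dict).getD []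

-- inner loops: for row in range(5): for pixel in char_matrix[row]: matrix[row].append(value if pixel == 1 else 0)
-- (char_matrix[row] raising IndexError on short glyphs is excluded by Pre_; getD [] is never reached inside Pre_)
def pvStepA (value : Int) (matrix : List (List Int)) (cm : List (List Int)) : List (List Int) :=
  (List.range 5).map (fun r => (matrix.getD r []) ++ ((cm.getD r []).map (fun p => if p = 1 then value else 0)))

-- if i != len(text)-1: for row in range(5): matrix[row].extend([0]*spacing)
def pvSpaceA (spacing : Int) (matrix : List (List Int)) : List (List Int) :=
  matrix.map (fun row => row ++ List.replicate spacing.toNat 0)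

-- for i, ch in enumerate(text): … (i the running index, n = len(text))
def pvLoopA (font_dict : List (String × List (List Int))) (spacing value : Int) (n : Nat) :
    Nat → List Char → List (List Int) → List (List Int)
  | _, [], matrix => matrix
  | i, ch :: rest, matrix =>
      let matrix1 := pvStepA value matrix (pvGlyphA font_dict ch)
      let matrix2 := if i ≠ n - 1 then pvSpaceA spacing matrix1 else matrix1
      pvLoopA font_dict spacing value n (i + 1) rest matrix2

def create_text_matrix (text : String) (font_dict : List (String × List (List Int))) (spacing : Int) (value : Int) : List (List Int) :=
  pvLoopA font_dict spacing value text.toList.length 0 text.toList (List.replicate 5 [])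

-- ===== PORT B =====
-- font_dict.get(ch, font_dict[" "]) as in Source B's comprehension
def pvGlyphB (font_dict : List (String × List (List Int))) (ch : Char) : List (List Int) :=
  match List.lookup (String.ofList [ch]) font_dict with
  | some g => g
  | none => (List.lookup " " font_dict).getD []

-- line = segments[0] if segments else []; for seg in segments[1:]: line = line + sep + seg
def pvJoinB (sep : List Int) (segs : List (List Int)) : List Int :=
  match segs with
  | [] => []
  | s :: rest => rest.foldl (fun line seg => line ++ sep ++ seg) s

def create_text_matrix_alt (text : String) (font_dict : List (String × List (List Int))) (spacing : Int) (value : Int) : List (List Int) :=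
  let glyphs := text.toList.map (pvGlyphB font_dict)
  let sep := List.replicate spacing.toNat 0
  (List.range 5).map (fun r =>
    pvJoinB sep (glyphs.map (fun g => (g.getD r []).map (fun p => if p = 1 then value else 0))))

-- ===== PRECONDITION & SPEC =====
-- proof-side-free resolver used only to state Pre_ (same lookup rule as the ports)
def pvResolvedGlyph (font_dict : List (String × List (List Int))) (ch : Char) : List (List Int) :=
  ((List.lookup (String.ofList [ch]) font_dict).orElse (fun _ => List.lookup " " font_dict)).getD []

-- Pre_ excludes exactly the inputs where A raises: a nonempty text with no " " key
-- (the default font_dict[" "] is evaluated eagerly for every character → KeyError),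
-- or some used glyph with fewer than 5 rows (char_matrix[row] → IndexError).
def Pre_create_text_matrix (text : String) (font_dict : List (String × List (List Int))) (spacing : Int) (value : Int) : Prop :=
  (text.toList = [] ∨ (List.lookup " " font_dict).isSome = true) ∧
  text.toList.all (fun ch => decide (5 ≤ (pvResolvedGlyph font_dict ch).length)) = true

instance (text : String) (font_dict : List (String × List (List Int))) (spacing : Int) (value : Int) : Decidable (Pre_create_text_matrix text font_dict spacing value) := by unfold Pre_create_text_matrix; infer_instance

def pvWitness_create_text_matrix : String × (List (String × List (List Int))) × Int × Int :=
  ("A ", [(" ", [[0], [0], [0], [0], [0]]), ("A", [[1, 1], [1, 0], [1, 1], [1, 0], [1, 0]])], 1, 2)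

def Spec_create_text_matrix (text : String) (font_dict : List (String × List (List Int))) (spacing : Int) (value : Int) (out : List (List Int)) : Prop := out = create_text_matrix_alt text font_dict spacing value
instance (text : String) (font_dict : List (String × List (List Int))) (spacing : Int) (value : Int) (out : List (List Int)) : Decidable (Spec_create_text_matrix text font_dict spacing value out) := by unfold Spec_create_text_matrix; infer_instance

-- ===== CLAIM (what is proved, stated in full; the proofs are below) =====
def Claim_equal_create_text_matrix : Prop := ∀ (text : String) (font_dict : List (String × List (List Int))) (spacing : Int) (value : Int), Dom_create_text_matrix text font_dict spacing value → Pre_create_text_matrix text font_dict spacing value → Spec_create_text_matrix text font_dict spacing value (create_text_matrix text font_dict spacing value)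

-- ===== LEMMAS AND PROOFS =====

-- canonical row content: first segment, then "sep ++ segment" for each later one
def pvBody (sep : List Int) : List (List Int) → List Int
  | [] => []
  | s :: rest => s ++ rest.flatMap (fun t => sep ++ t)

theorem pvGlyphA_eq_B (font_dict : List (String × List (List Int))) (ch : Char) :
    pvGlyphA font_dict ch = pvGlyphB font_dict ch := rfl

theorem pvJoinB_eq_body (sep : List Int) (segs : List (List Int)) :
    pvJoinB sep segs = pvBody sep segs := by
  cases segs with
  | nil => rfl
  | cons s rest =>
    simp only [pvJoinB, pvBody]
    induction rest generalizing s with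
    | nil => simp
    | cons t ts ih => simp [List.append_assoc, List.flatMap]

theorem map_range5_getD (m : List (List Int)) (h : m.length = 5) :
    (List.range 5).map (fun r => m.getD r []) = m := by
  match m, h with
  | [a, b, c, d, e], _ => simp [List.range_succ]

theorem getD_map_range5 (f : Nat → List Int) (r : Nat) (hr : r < 5) :
    (((List.range 5).map f).getD r []) = f r := by
  interval_cases r <;> simp [List.range_succ]

theorem pvLoopA_eq (font_dict : List (String × List (List Int))) (spacing value : Int)
    (n : Nat) (cs : List Char) (i : Nat) (m : List (List Int))
    (hm : m.length = 5) (hi : i + cs.length = n) :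
    pvLoopA font_dict spacing value n i cs m =
      (List.range 5).map (fun r => m.getD r [] ++
        pvBody (List.replicate spacing.toNat 0)
          (cs.map (fun ch => ((pvGlyphA font_dict ch).getD r []).map (fun p => if p = 1 then value else 0)))) := by
  induction cs generalizing i m with
  | nil =>
    simp only [pvLoopA, List.map_nil, pvBody, List.append_nil]
    exact (map_range5_getD m hm).symm
  | cons ch rest ih =>
    cases rest with
    | nil =>
      have hlast : ¬ i ≠ n - 1 := by simp at hi; omega
      simp only [pvLoopA, if_neg hlast]
      simp [pvStepA, pvBody]
    | cons ch2 rest2 =>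
      have hne : i ≠ n - 1 := by simp at hi; omega
      have hstep : pvLoopA font_dict spacing value n i (ch :: ch2 :: rest2) m =
          pvLoopA font_dict spacing value n (i + 1) (ch2 :: rest2)
            (pvSpaceA spacing (pvStepA value m (pvGlyphA font_dict ch))) := by
        rw [pvLoopA]; simp only [if_pos hne]
      rw [hstep, ih (i + 1) _ (by simp [pvSpaceA, pvStepA]) (by simp at hi ⊢; omega)]
      apply List.map_congr_left
      intro r hr
      have hr5 : r < 5 := List.mem_range.mp hr
      have : (pvSpaceA spacing (pvStepA value m (pvGlyphA font_dict ch))).getD r [] =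
          m.getD r [] ++ ((pvGlyphA font_dict ch).getD r []).map (fun p => if p = 1 then value else 0)
            ++ List.replicate spacing.toNat 0 := by
        simp only [pvSpaceA, pvStepA, List.map_map]
        exact getD_map_range5 _ r hr5
      rw [this]
      simp [pvBody, List.append_assoc]

-- ===== VERDICT (by name: the statement is the Claim_ definition above) =====
theorem create_text_matrix_spec : Claim_equal_create_text_matrix := by
  intro text font_dict spacing value _hdom _hpre
  unfold Spec_create_text_matrix create_text_matrix create_text_matrix_alt
  rw [pvLoopA_eq font_dict spacing value _ _ 0 _ (by simp) (by simp)]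
  apply List.map_congr_left
  intro r hr
  rw [pvJoinB_eq_body]
  have hr5 : r < 5 := List.mem_range.mp hr
  interval_cases r <;> simp [pvGlyphA_eq_B, Function.comp_def]
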